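-- pv_equiv track=rewrite | github.com/ravenoak/devsynth | scripts/add_missing_markers.py | prioritize_tests
-- ===== SOURCE A (Python) =====
-- def prioritize_tests(tests: list[str], priority_modules: list[str]) -> list[str]:
--     """
--     Prioritize tests based on module priority.
--
--     Args:
--         tests: List of test paths
--         priority_modules: List of high-priority modules
--
--     Returns:
--         Prioritized list of test paths
--     """
--     high_priority = []
--     normal_priority = []
--
--     for test in tests:
--         if any(test.startswith(module) for module in priority_modules):
--             high_priority.append(test)
--         else:
--             normal_priority.append(test)
--
--     return high_priority + normal_priority
-- ===== SOURCE B (Python) =====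
-- def prioritize_tests(tests: list[str], priority_modules: list[str]) -> list[str]:
--     """Prioritize tests based on module priority (stable sort on a binary key)."""
--     return sorted(
--         tests,
--         key=lambda t: 0 if any(t.startswith(m) for m in priority_modules) else 1,
--     )
-- ===== Notes on version B (the rewrite author's own statement) =====
-- stated objective: idiomatic
-- what changed: Replaced the explicit high/normal bucket lists and their concatenation by a single stable sort keyed 0/1 on priority membership; stability keeps each group's original order.
import Mathlib
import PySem

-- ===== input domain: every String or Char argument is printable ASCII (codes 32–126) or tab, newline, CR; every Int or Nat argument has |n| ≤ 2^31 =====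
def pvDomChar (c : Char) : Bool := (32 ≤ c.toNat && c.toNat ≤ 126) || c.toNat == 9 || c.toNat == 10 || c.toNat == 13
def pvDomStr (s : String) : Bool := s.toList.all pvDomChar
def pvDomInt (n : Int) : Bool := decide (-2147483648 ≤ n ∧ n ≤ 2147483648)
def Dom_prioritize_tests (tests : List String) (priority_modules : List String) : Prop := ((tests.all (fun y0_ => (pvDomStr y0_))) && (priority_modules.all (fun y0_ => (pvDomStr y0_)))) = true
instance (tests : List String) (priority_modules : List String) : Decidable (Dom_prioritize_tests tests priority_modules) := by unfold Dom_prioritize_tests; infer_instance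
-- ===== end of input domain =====

-- B replaces A's two explicit buckets + concatenation by one stable sort on a 0/1 key (idiomatic, same behaviour).

-- ===== PORT A =====
-- two accumulator lists, appended in order, then concatenated (literal port of A's loop)
def prioritize_tests (tests : List String) (priority_modules : List String) : List String :=
  let r := tests.foldl
    (fun acc test =>
      if priority_modules.any (fun module => PySem.Str.startswith test module) then
        (acc.1 ++ [test], acc.2)
      else
        (acc.1, acc.2 ++ [test]))
    ([], [])
  r.1 ++ r.2

-- ===== PORT B =====
-- sorted(tests, key=lambda t: 0 if any(t.startswith(m) for m in priority_modules) else 1)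
def prioritize_tests_alt (tests : List String) (priority_modules : List String) : List String :=
  PySem.List.sorted tests
    (fun t => if priority_modules.any (fun m => PySem.Str.startswith t m) then (0 : Int) else 1)
    false

-- ===== PRECONDITION & SPEC =====
def Spec_prioritize_tests (tests : List String) (priority_modules : List String) (out : List String) : Prop := out = prioritize_tests_alt tests priority_modules
instance (tests : List String) (priority_modules : List String) (out : List String) : Decidable (Spec_prioritize_tests tests priority_modules out) := by unfold Spec_prioritize_tests; infer_instance

-- ===== CLAIM (what is proved, stated in full; the proofs are below) =====
def Claim_equal_prioritize_tests : Prop := ∀ (tests : List String) (priority_modules : List String), Dom_prioritize_tests tests priority_modules → Spec_prioritize_tests tests priority_modules (prioritize_tests tests priority_modules)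

-- ===== LEMMAS AND PROOFS =====

-- A's loop computes (acc.1 ++ filter p, acc.2 ++ filter !p)
theorem pvA_foldl (p : String → Bool) (xs : List String) (h n : List String) :
    xs.foldl (fun acc t => if p t then (acc.1 ++ [t], acc.2) else (acc.1, acc.2 ++ [t])) (h, n)
      = (h ++ xs.filter p, n ++ xs.filter (fun t => !p t)) := by
  induction xs generalizing h n with
  | nil => simp
  | cons x xs ih =>
    by_cases hx : p x = true <;>
      simp [List.foldl_cons, hx, ih]

-- insertBy skips a prefix it never inserts before
theorem pvInsertBy_append (before : String → String → Bool) (x : String) (as bs : List String)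
    (h : ∀ a ∈ as, before x a = false) :
    PySem.List.insertBy before x (as ++ bs) = as ++ PySem.List.insertBy before x bs := by
  induction as with
  | nil => rfl
  | cons a as ih =>
    have ha : before x a = false := h a (List.mem_cons_self ..)
    simp only [List.cons_append, PySem.List.insertBy, ha]
    simp only [Bool.false_eq_true, if_false]
    exact congrArg (a :: ·) (ih fun a' ha' => h a' (List.mem_cons_of_mem _ ha'))

-- insertBy puts x in front when it goes before every element
theorem pvInsertBy_front (before : String → String → Bool) (x : String) (ys : List String)
    (h : ∀ y ∈ ys, before x y = true) :
    PySem.List.insertBy before x ys = x :: ys := by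
  cases ys with
  | nil => rfl
  | cons y ys =>
    have hy : before x y = true := h y (List.mem_cons_self ..)
    simp [PySem.List.insertBy, hy]

-- the stable binary-key sort is exactly the partition concatenation
theorem pvSorted_binary (p : String → Bool) (xs : List String) :
    PySem.List.sorted xs (fun t => if p t then (0 : Int) else 1) false
      = xs.filter p ++ xs.filter (fun t => !p t) := by
  rw [PySem.List.sorted_eq_foldl_insertBy]
  set key : String → Int := fun t => if p t then (0 : Int) else 1 with hkey
  set before : String → String → Bool := fun a b => decide (key a < key b) with hbefore
  induction xs using List.reverseRecOn with
  | nil => rfl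
  | append_singleton xs x ih =>
    rw [List.foldl_append, List.foldl_cons, List.foldl_nil, ih]
    by_cases hx : p x = true
    · -- key x = 0: goes after the p-block, before the ¬p-block
      rw [pvInsertBy_append before x _ _ (by
        intro a ha
        have hpa : p a = true := (List.mem_filter.mp ha).2
        simp [hbefore, hkey, hx, hpa])]
      rw [pvInsertBy_front before x _ (by
        intro y hy
        have hpy : p y = false := by
          have := (List.mem_filter.mp hy).2
          simpa using this
        simp [hbefore, hkey, hx, hpy])]
      simp [List.filter_append, hx]
    · -- key x = 1: never inserted before anything, appended at the very end
      have hx' : p x = false := by simpa using hx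
      rw [PySem.List.insertBy_of_forall_not_before before x _ (by
        intro y hy
        rcases List.mem_append.mp hy with h1 | h1
        · have hpy : p y = true := (List.mem_filter.mp h1).2
          simp [hbefore, hkey, hx', hpy]
        · have hpy : p y = false := by
            have := (List.mem_filter.mp h1).2
            simpa using this
          simp [hbefore, hkey, hx', hpy])]
      simp [List.filter_append, hx']

-- ===== VERDICT (by name: the statement is the Claim_ definition above) =====
theorem prioritize_tests_spec : Claim_equal_prioritize_tests := by
  intro tests priority_modules _
  unfold Spec_prioritize_tests prioritize_tests prioritize_tests_alt
  rw [pvA_foldl (fun t => priority_modules.any (fun m => PySem.Str.startswith t m)) tests [] [],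
    pvSorted_binary]
  simp
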